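-- pv_equiv track=rewrite | github.com/xinli2/Word-Search | list_of_cols_on_bottom.py | build_rect
-- ===== SOURCE A (Python) =====
-- def build_rect(wid, hei):
--     assert wid >= 3
--     assert hei >= 3
--     lst=[]
--     data=[]
--     new_data=[]
--     for i in range(wid):
--         lst =[]
--         for j in range (hei):
--             if i < 1:
--                 if j < 1:
--                     lst.append(' ')
--                 elif j>(wid-2):
--                     lst.append(' ')
--                 else:
--                     lst.append('L')
--             elif i > wid-2:
--                 if j <1 :
--                     lst.append(' ')
--                 elif j>(wid-2):
--                     lst.append(' ')
--                 else:
--                     lst.append('R')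
--             else:
--                 if j < 1:
--                     lst.append('B')
--                 elif j>(wid-2):
--                     lst.append('T')
--                 else:
--                     lst.append('.')
--
--         data.append(lst)
--
--
--
--     return data
-- ===== SOURCE B (Python) =====
-- def build_rect(wid, hei):
--     assert wid >= 3
--     assert hei >= 3
--     cols = [0 if j < 1 else (2 if j > wid - 2 else 1) for j in range(hei)]
--     def row(c0, c1, c2):
--         return [c0 if c == 0 else (c1 if c == 1 else c2) for c in cols]
--     return [row(' ', 'L', ' ')] + [row('B', '.', 'T') for _ in range(wid - 2)] + [row(' ', 'R', ' ')]
-- ===== Notes on version B (the rewrite author's own statement) =====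
-- stated objective: simpler
-- what changed: B classifies each column index once into 0/1/2 (keeping A's wid-2 column threshold), builds each row by a 3-way table lookup over that classification list, and assembles the grid as [top] + (wid-2) middle rows + [bottom] instead of re-branching on both i and j inside a nested per-cell loop.
import Mathlib
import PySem

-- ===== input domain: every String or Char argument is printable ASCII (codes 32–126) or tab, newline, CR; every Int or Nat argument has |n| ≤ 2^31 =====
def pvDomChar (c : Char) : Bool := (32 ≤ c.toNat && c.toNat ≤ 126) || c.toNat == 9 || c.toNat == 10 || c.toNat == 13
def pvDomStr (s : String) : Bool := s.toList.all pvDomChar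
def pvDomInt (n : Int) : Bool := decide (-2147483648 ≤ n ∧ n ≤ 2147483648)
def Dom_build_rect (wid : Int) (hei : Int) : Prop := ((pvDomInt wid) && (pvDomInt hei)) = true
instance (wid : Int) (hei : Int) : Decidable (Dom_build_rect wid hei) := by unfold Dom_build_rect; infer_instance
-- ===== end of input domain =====

-- B separates a column-classification pass from row assembly (top/middle/bottom by table lookup)
-- instead of branching on both i and j per cell: simpler decomposition, same cost.


-- ===== PORT A =====
def build_rect (wid : Int) (hei : Int) : List (List String) :=
  (PySem.List.pyRange 0 wid 1).foldl (fun data i =>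
    data ++ [(PySem.List.pyRange 0 hei 1).foldl (fun lst j =>
      if i < 1 then
        (if j < 1 then lst ++ [" "] else if j > wid - 2 then lst ++ [" "] else lst ++ ["L"])
      else if i > wid - 2 then
        (if j < 1 then lst ++ [" "] else if j > wid - 2 then lst ++ [" "] else lst ++ ["R"])
      else
        (if j < 1 then lst ++ ["B"] else if j > wid - 2 then lst ++ ["T"] else lst ++ ["."])) []]) []

-- ===== PORT B =====
-- helper: row(c0, c1, c2) from Source B — table lookup over the column-classification list
def pvRow (c0 c1 c2 : String) (cols : List Int) : List String :=
  cols.map (fun c => if c = 0 then c0 else if c = 1 then c1 else c2)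

def build_rect_alt (wid : Int) (hei : Int) : List (List String) :=
  let cols := (PySem.List.pyRange 0 hei 1).map
    (fun j => if j < 1 then (0 : Int) else if j > wid - 2 then 2 else 1)
  [pvRow " " "L" " " cols]
    ++ (PySem.List.pyRange 0 (wid - 2) 1).map (fun _ => pvRow "B" "." "T" cols)
    ++ [pvRow " " "R" " " cols]

-- ===== PRECONDITION & SPEC =====
-- A asserts wid >= 3 and hei >= 3 (AssertionError otherwise); Pre_ excludes exactly those raising inputs.
def Pre_build_rect (wid : Int) (hei : Int) : Prop := 3 ≤ wid ∧ 3 ≤ hei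
instance (wid : Int) (hei : Int) : Decidable (Pre_build_rect wid hei) := by unfold Pre_build_rect; infer_instance
def pvWitness_build_rect : Int × Int := (3, 4)

def Spec_build_rect (wid : Int) (hei : Int) (out : List (List String)) : Prop := out = build_rect_alt wid hei
instance (wid : Int) (hei : Int) (out : List (List String)) : Decidable (Spec_build_rect wid hei out) := by unfold Spec_build_rect; infer_instance

-- ===== CLAIM (what is proved, stated in full; the proofs are below) =====
def Claim_equal_build_rect : Prop := ∀ (wid : Int) (hei : Int), Dom_build_rect wid hei → Pre_build_rect wid hei → Spec_build_rect wid hei (build_rect wid hei)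

-- ===== LEMMAS AND PROOFS =====

-- A's per-cell expression, with the append hoisted out of the branches
def pvCell (wid : Int) (i j : Int) : String :=
  if i < 1 then (if j < 1 then " " else if j > wid - 2 then " " else "L")
  else if i > wid - 2 then (if j < 1 then " " else if j > wid - 2 then " " else "R")
  else (if j < 1 then "B" else if j > wid - 2 then "T" else ".")

theorem pvCell_foldl (wid hei i : Int) :
    (PySem.List.pyRange 0 hei 1).foldl (fun lst j =>
      if i < 1 then
        (if j < 1 then lst ++ [" "] else if j > wid - 2 then lst ++ [" "] else lst ++ ["L"])
      else if i > wid - 2 then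
        (if j < 1 then lst ++ [" "] else if j > wid - 2 then lst ++ [" "] else lst ++ ["R"])
      else
        (if j < 1 then lst ++ ["B"] else if j > wid - 2 then lst ++ ["T"] else lst ++ ["."])) []
    = (PySem.List.pyRange 0 hei 1).map (pvCell wid i) := by
  have h : ∀ (l : List Int) (acc : List String),
      l.foldl (fun lst j =>
        if i < 1 then
          (if j < 1 then lst ++ [" "] else if j > wid - 2 then lst ++ [" "] else lst ++ ["L"])
        else if i > wid - 2 then
          (if j < 1 then lst ++ [" "] else if j > wid - 2 then lst ++ [" "] else lst ++ ["R"])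
        else
          (if j < 1 then lst ++ ["B"] else if j > wid - 2 then lst ++ ["T"] else lst ++ ["."])) acc
      = acc ++ l.map (pvCell wid i) := by
    intro l
    induction l with
    | nil => simp
    | cons x xs ih =>
      intro acc
      simp only [List.foldl_cons, List.map_cons, ih, pvCell]
      split_ifs <;> simp
  simpa using h (PySem.List.pyRange 0 hei 1) []

theorem build_rect_eq_map (wid hei : Int) :
    build_rect wid hei
    = (PySem.List.pyRange 0 wid 1).map (fun i => (PySem.List.pyRange 0 hei 1).map (pvCell wid i)) := by
  unfold build_rect
  simp only [pvCell_foldl]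
  simpa using PySem.List.foldl_append_singleton_eq_map
    (f := fun i => (PySem.List.pyRange 0 hei 1).map (pvCell wid i))
    (l := PySem.List.pyRange 0 wid 1) (acc := [])

theorem build_rect_spec' (wid hei : Int) (hw : 3 ≤ wid) :
    build_rect wid hei = build_rect_alt wid hei := by
  rw [build_rect_eq_map]
  unfold build_rect_alt pvRow
  simp only [List.map_map]
  -- split the row range into first row, middle rows, last row
  have h0 : PySem.List.pyRange 0 wid 1 = 0 :: PySem.List.pyRange 1 wid 1 :=
    PySem.List.pyRange_one_cons (by omega)
  have h1 : PySem.List.pyRange 1 wid 1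
      = PySem.List.pyRange 1 (wid - 1) 1 ++ PySem.List.pyRange (wid - 1) wid 1 :=
    PySem.List.pyRange_one_append _ _ _ (by omega) (by omega)
  have h2 : PySem.List.pyRange (wid - 1) wid 1 = [wid - 1] := by
    have := PySem.List.pyRange_one_singleton (a := wid - 1)
    simpa [show wid - 1 + 1 = wid by omega] using this
  rw [h0, h1, h2]
  simp only [List.map_cons, List.map_append, List.map_nil]
  congr 1
  · -- top row
    apply List.map_congr_left
    intro j _
    simp only [pvCell, Function.comp]
    split_ifs <;> first | rfl | omega
  congr 1
  · -- middle rows: both sides are replicate of the same row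
    have hmid : (PySem.List.pyRange 1 (wid - 1) 1).map
        (fun i => (PySem.List.pyRange 0 hei 1).map (pvCell wid i))
        = (PySem.List.pyRange 1 (wid - 1) 1).map
        (fun _ => (PySem.List.pyRange 0 hei 1).map (fun j =>
          (fun c => if c = 0 then "B" else if c = 1 then "." else "T")
            ((fun j => if j < 1 then (0 : Int) else if j > wid - 2 then 2 else 1) j))) := by
      apply List.map_congr_left
      intro i hi
      rw [PySem.List.mem_pyRange_one] at hi
      apply List.map_congr_left
      intro j _
      simp only [pvCell]
      rw [if_neg (by omega), if_neg (by omega)]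
      split_ifs <;> first | rfl | omega
    rw [hmid]
    rw [List.map_const', List.map_const', PySem.List.length_pyRange_one,
      PySem.List.length_pyRange_one]
    congr 2
    omega
  · -- bottom row
    simp only [List.cons.injEq, and_true]
    apply List.map_congr_left
    intro j _
    simp only [pvCell, Function.comp]
    rw [if_neg (by omega), if_pos (by omega)]
    split_ifs <;> first | rfl | omega

-- ===== VERDICT (by name: the statement is the Claim_ definition above) =====
theorem build_rect_spec : Claim_equal_build_rect := by
  intro wid hei _ hpre
  unfold Spec_build_rect
  exact build_rect_spec' wid hei hpre.1
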